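-- pv_equiv track=rewrite | github.com/AnimeshTalukdar/LeetCode-leethub | Array Operations - GFG/array-operations.py | arrayOperations
-- ===== SOURCE A (Python) =====
-- from typing import List
--
-- def arrayOperations(n: int, arr: List[int]) -> int:
--     # code here
--     count = 0
--     for i in range(n):
--         if arr[i] == 0:
--             continue
--         elif arr[i] != 0:
--             count += 1
--             j = i + 1
--             while j < n:
--                 if arr[j] != 0:
--                     arr[j] = 0
--                 else:
--                     break
--                 j += 1
--     return count
-- ===== SOURCE B (Python) =====
-- from typing import List
--
-- def arrayOperations(n: int, arr: List[int]) -> int: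
--     # Single forward pass: a run starts where the element is non-zero and the
--     # original previous element was zero (tracked in prev_zero).
--     count = 0
--     prev_zero = True
--     for i in range(n):
--         if arr[i] != 0:
--             if prev_zero:
--                 count += 1
--             prev_zero = False
--         else:
--             prev_zero = True
--     return count
-- ===== Notes on version B (the rewrite author's own statement) =====
-- stated objective: faster
-- what changed: Replaces A's nested inner while-loop lookahead (which zeroes out the rest of each run in the mutated array) by a single forward pass that carries a prev_zero boolean, so each element is inspected exactly once; B does not mutate arr (the claim is about the return value only).
import Mathlib
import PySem

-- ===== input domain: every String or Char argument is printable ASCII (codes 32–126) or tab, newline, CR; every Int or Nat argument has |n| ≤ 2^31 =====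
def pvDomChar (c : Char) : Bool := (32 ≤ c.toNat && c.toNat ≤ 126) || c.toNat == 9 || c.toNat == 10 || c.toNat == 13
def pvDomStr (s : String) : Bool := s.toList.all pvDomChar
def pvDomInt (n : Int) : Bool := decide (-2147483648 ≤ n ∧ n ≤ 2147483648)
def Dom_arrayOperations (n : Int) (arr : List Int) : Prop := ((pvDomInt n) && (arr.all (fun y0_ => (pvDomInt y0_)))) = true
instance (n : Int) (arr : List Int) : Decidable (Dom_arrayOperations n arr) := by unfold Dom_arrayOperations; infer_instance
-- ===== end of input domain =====

-- B replaces A's inner while-loop lookahead by a single pass with a prev_zero boolean;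
-- A mutates arr in place (zeroes run tails) while B does not: the equivalence proved is about the return value only.

-- ===== PORT A =====
-- inner while loop of A: 'j = i+1; while j < n: if arr[j] != 0: arr[j] = 0 else break; j += 1'
def aInner (n j : Int) (a : List Int) : List Int :=
  if _h : j < n then
    if PySem.List.pyGetD a j 0 ≠ 0 then aInner n (j + 1) (PySem.List.pySetD a j 0) else a
  else a
termination_by (n - j).toNat
decreasing_by omega

-- one iteration of A's outer for-loop; state = (count, arr)
def aStep (n : Int) (s : Int × List Int) (i : Int) : Int × List Int :=
  if PySem.List.pyGetD s.2 i 0 = 0 then s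
  else (s.1 + 1, aInner n (i + 1) s.2)

def arrayOperations (n : Int) (arr : List Int) : Int :=
  ((PySem.List.pyRange 0 n 1).foldl (aStep n) (0, arr)).1

-- ===== PORT B =====
-- one iteration of B's loop; state = (count, prev_zero)
def bStep (arr : List Int) (s : Int × Bool) (i : Int) : Int × Bool :=
  if PySem.List.pyGetD arr i 0 ≠ 0 then ((if s.2 then s.1 + 1 else s.1), false)
  else (s.1, true)

def arrayOperations_alt (n : Int) (arr : List Int) : Int :=
  ((PySem.List.pyRange 0 n 1).foldl (bStep arr) (0, true)).1

-- ===== PRECONDITION & SPEC =====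
-- Pre_ excludes exactly the inputs where Python A raises IndexError: n exceeding len(arr).
def Pre_arrayOperations (n : Int) (arr : List Int) : Prop := n ≤ (arr.length : Int)
instance (n : Int) (arr : List Int) : Decidable (Pre_arrayOperations n arr) := by unfold Pre_arrayOperations; infer_instance
def pvWitness_arrayOperations : Int × List Int := (4, [1, 2, 0, 3])

def Spec_arrayOperations (n : Int) (arr : List Int) (out : Int) : Prop := out = arrayOperations_alt n arr
instance (n : Int) (arr : List Int) (out : Int) : Decidable (Spec_arrayOperations n arr out) := by unfold Spec_arrayOperations; infer_instance

-- ===== CLAIM (what is proved, stated in full; the proofs are below) =====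
def Claim_equal_arrayOperations : Prop := ∀ (n : Int) (arr : List Int), Dom_arrayOperations n arr → Pre_arrayOperations n arr → Spec_arrayOperations n arr (arrayOperations n arr)

-- ===== LEMMAS AND PROOFS =====

-- pyGetD with a nonnegative index past the end yields the default
theorem pyGetD_oob (a : List Int) (i : Int) (d : Int) (hi : 0 ≤ i) (hl : a.length ≤ i.toNat) :
    PySem.List.pyGetD a i d = d := by
  rw [← Int.toNat_of_nonneg hi, PySem.List.pyGetD_natCast]
  exact List.getD_eq_default _ _ hl

-- reading after an in-range write
theorem setD_get (a : List Int) (j m v d : Int) (hj : 0 ≤ j) (hm : 0 ≤ m) (hjl : j.toNat < a.length) :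
    PySem.List.pyGetD (PySem.List.pySetD a j v) m d = if m = j then v else PySem.List.pyGetD a m d := by
  rw [← Int.toNat_of_nonneg hj, ← Int.toNat_of_nonneg hm,
      PySem.List.pyGetD_pySetD_natCast a j.toNat m.toNat v d hjl]
  by_cases he : m.toNat = j.toNat
  · rw [if_pos he, if_pos (by omega : (m.toNat : Int) = (j.toNat : Int))]
  · rw [if_neg he, if_neg (by omega : ¬(m.toNat : Int) = (j.toNat : Int))]

-- characterisation of A's inner while loop: it zeroes the maximal nonzero block starting at j (capped at n)
theorem aInner_get (n j : Int) (a : List Int) (hj : 0 ≤ j) (k : Int) (hk : 0 ≤ k) :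
    PySem.List.pyGetD (aInner n j a) k 0 =
      if j ≤ k ∧ k < n ∧ (∀ m : Int, j ≤ m → m ≤ k → PySem.List.pyGetD a m 0 ≠ 0) then 0
      else PySem.List.pyGetD a k 0 := by
  unfold aInner
  split
  · rename_i h
    by_cases hz : PySem.List.pyGetD a j 0 = 0
    · rw [if_neg (not_not_intro hz)]
      have hc : ¬(j ≤ k ∧ k < n ∧ ∀ m : Int, j ≤ m → m ≤ k → PySem.List.pyGetD a m 0 ≠ 0) :=
        fun hC => hC.2.2 j (le_refl j) hC.1 hz
      rw [if_neg hc]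
    · have hnz : PySem.List.pyGetD a j 0 ≠ 0 := hz
      rw [if_pos hnz]
      have hjl : j.toNat < a.length := by
        by_contra hcon
        exact hnz (pyGetD_oob a j 0 hj (by omega))
      have ih := aInner_get n (j + 1) (PySem.List.pySetD a j 0) (by omega) k hk
      rw [ih]
      have hset : ∀ m : Int, 0 ≤ m → PySem.List.pyGetD (PySem.List.pySetD a j 0) m 0 =
          if m = j then 0 else PySem.List.pyGetD a m 0 := fun m hm => setD_get a j m 0 0 hj hm hjl
      split_ifs with h1 h2 h2
      · rfl
      · exfalso
        apply h2
        refine ⟨by omega, h1.2.1, fun m hm1 hm2 => ?_⟩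
        rcases eq_or_lt_of_le hm1 with he | hlt
        · rw [← he]; exact hnz
        · have hv := h1.2.2 m (by omega) hm2
          rw [hset m (by omega), if_neg (by omega : ¬m = j)] at hv
          exact hv
      · rcases eq_or_lt_of_le h2.1 with he | hlt
        · rw [hset k hk, if_pos he.symm]
        · exfalso
          apply h1
          refine ⟨by omega, h2.2.1, fun m hm1 hm2 => ?_⟩
          rw [hset m (by omega), if_neg (by omega : ¬m = j)]
          exact h2.2.2 m (by omega) hm2
      · have hkj : k ≠ j := by
          intro he
          subst he
          apply h2
          refine ⟨by omega, h, fun m hm1 hm2 => ?_⟩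
          have hmj : m = k := le_antisymm hm2 hm1
          rw [hmj]; exact hnz
        rw [hset k hk, if_neg hkj]
  · rename_i h
    have hc : ¬(j ≤ k ∧ k < n ∧ ∀ m : Int, j ≤ m → m ≤ k → PySem.List.pyGetD a m 0 ≠ 0) :=
      fun hC => h (lt_of_le_of_lt hC.1 hC.2.1)
    rw [if_neg hc]
termination_by (n - j).toNat
decreasing_by omega

-- main invariant: processing indices from i, A's mutated array agrees with B's (count, prev_zero) view of the original
theorem main_inv (arr : List Int) (n : Int) (i : Int) (a : List Int) (c : Int) (pz : Bool)
    (hi : 0 ≤ i)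
    (hinv : ∀ k : Int, i ≤ k → PySem.List.pyGetD a k 0 =
      if pz = false ∧ k < n ∧ (∀ m : Int, i ≤ m → m ≤ k → PySem.List.pyGetD arr m 0 ≠ 0) then 0
      else PySem.List.pyGetD arr k 0) :
    ((PySem.List.pyRange i n 1).foldl (aStep n) (c, a)).1 =
    ((PySem.List.pyRange i n 1).foldl (bStep arr) (c, pz)).1 := by
  by_cases h : i < n
  · rw [PySem.List.pyRange_one_cons h, List.foldl_cons, List.foldl_cons]
    cases pz with
    | true =>
      have hinv' : ∀ k : Int, i ≤ k → PySem.List.pyGetD a k 0 = PySem.List.pyGetD arr k 0 := by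
        intro k hk
        rw [hinv k hk]
        simp
      by_cases hz : PySem.List.pyGetD arr i 0 = 0
      · have ha : aStep n (c, a) i = (c, a) := by simp [aStep, hinv' i (le_refl i), hz]
        have hb : bStep arr (c, true) i = (c, true) := by simp [bStep, hz]
        rw [ha, hb]
        exact main_inv arr n (i + 1) a c true (by omega)
          (fun k hk => by rw [hinv' k (by omega)]; simp)
      · have ha : aStep n (c, a) i = (c + 1, aInner n (i + 1) a) := by
          simp [aStep, hinv' i (le_refl i), hz]
        have hb : bStep arr (c, true) i = (c + 1, false) := by simp [bStep, hz]
        rw [ha, hb]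
        refine main_inv arr n (i + 1) (aInner n (i + 1) a) (c + 1) false (by omega) ?_
        intro k hk
        rw [aInner_get n (i + 1) a (by omega) k (by omega)]
        by_cases hc : k < n ∧ ∀ m : Int, i + 1 ≤ m → m ≤ k → PySem.List.pyGetD arr m 0 ≠ 0
        · have c1 : i + 1 ≤ k ∧ k < n ∧ ∀ m : Int, i + 1 ≤ m → m ≤ k → PySem.List.pyGetD a m 0 ≠ 0 :=
            ⟨by omega, hc.1, fun m h1 h2 => by rw [hinv' m (by omega)]; exact hc.2 m h1 h2⟩
          have c2 : (false = false) ∧ k < n ∧ ∀ m : Int, i + 1 ≤ m → m ≤ k → PySem.List.pyGetD arr m 0 ≠ 0 :=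
            ⟨rfl, hc.1, hc.2⟩
          rw [if_pos c1, if_pos c2]
        · have c1 : ¬(i + 1 ≤ k ∧ k < n ∧ ∀ m : Int, i + 1 ≤ m → m ≤ k → PySem.List.pyGetD a m 0 ≠ 0) :=
            fun hC => hc ⟨hC.2.1, fun m h1 h2 => by rw [← hinv' m (by omega)]; exact hC.2.2 m h1 h2⟩
          have c2 : ¬((false = false) ∧ k < n ∧ ∀ m : Int, i + 1 ≤ m → m ≤ k → PySem.List.pyGetD arr m 0 ≠ 0) :=
            fun hC => hc ⟨hC.2.1, hC.2.2⟩
          rw [if_neg c1, if_neg c2]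
          exact hinv' k (by omega)
    | false =>
      have hQ0 : PySem.List.pyGetD a i 0 = 0 := by
        rw [hinv i (le_refl i)]
        by_cases hz : PySem.List.pyGetD arr i 0 = 0
        · have hcn : ¬((false = false) ∧ i < n ∧ ∀ m : Int, i ≤ m → m ≤ i → PySem.List.pyGetD arr m 0 ≠ 0) :=
            fun hC => hC.2.2 i (le_refl i) (le_refl i) hz
          rw [if_neg hcn]
          exact hz
        · have hcc : (false = false) ∧ i < n ∧ ∀ m : Int, i ≤ m → m ≤ i → PySem.List.pyGetD arr m 0 ≠ 0 :=
            ⟨rfl, h, fun m h1 h2 => by have hmi : m = i := le_antisymm h2 h1; rw [hmi]; exact hz⟩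
          rw [if_pos hcc]
      have ha : aStep n (c, a) i = (c, a) := by simp [aStep, hQ0]
      by_cases hz : PySem.List.pyGetD arr i 0 = 0
      · have hb : bStep arr (c, false) i = (c, true) := by simp [bStep, hz]
        rw [ha, hb]
        refine main_inv arr n (i + 1) a c true (by omega) ?_
        intro k hk
        rw [hinv k (by omega)]
        have hcn : ¬((false = false) ∧ k < n ∧ ∀ m : Int, i ≤ m → m ≤ k → PySem.List.pyGetD arr m 0 ≠ 0) :=
          fun hC => hC.2.2 i (by omega) (by omega) hz
        rw [if_neg hcn]
        simp
      · have hb : bStep arr (c, false) i = (c, false) := by simp [bStep, hz]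
        rw [ha, hb]
        refine main_inv arr n (i + 1) a c false (by omega) ?_
        intro k hk
        rw [hinv k (by omega)]
        by_cases hc : k < n ∧ ∀ m : Int, i + 1 ≤ m → m ≤ k → PySem.List.pyGetD arr m 0 ≠ 0
        · have c1 : (false = false) ∧ k < n ∧ ∀ m : Int, i ≤ m → m ≤ k → PySem.List.pyGetD arr m 0 ≠ 0 :=
            ⟨rfl, hc.1, fun m h1 h2 => by
              rcases eq_or_lt_of_le h1 with he | hlt
              · rw [← he]; exact hz
              · exact hc.2 m (by omega) h2⟩
          have c2 : (false = false) ∧ k < n ∧ ∀ m : Int, i + 1 ≤ m → m ≤ k → PySem.List.pyGetD arr m 0 ≠ 0 :=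
            ⟨rfl, hc.1, hc.2⟩
          rw [if_pos c1, if_pos c2]
        · have c1 : ¬((false = false) ∧ k < n ∧ ∀ m : Int, i ≤ m → m ≤ k → PySem.List.pyGetD arr m 0 ≠ 0) :=
            fun hC => hc ⟨hC.2.1, fun m h1 h2 => hC.2.2 m (by omega) h2⟩
          have c2 : ¬((false = false) ∧ k < n ∧ ∀ m : Int, i + 1 ≤ m → m ≤ k → PySem.List.pyGetD arr m 0 ≠ 0) :=
            fun hC => hc ⟨hC.2.1, hC.2.2⟩
          rw [if_neg c1, if_neg c2]
  · rw [PySem.List.pyRange_one_eq_nil (by omega)]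
    simp
termination_by (n - i).toNat
decreasing_by all_goals omega

-- ===== VERDICT (by name: the statement is the Claim_ definition above) =====
theorem arrayOperations_spec : Claim_equal_arrayOperations := by
  intro n arr _ _
  unfold Spec_arrayOperations arrayOperations arrayOperations_alt
  exact main_inv arr n 0 arr 0 true (le_refl 0) (fun k _ => by simp)
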